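-- pv_equiv track=rewrite | github.com/harryjfowen/wet-woodland-research | wwr/code/potential/run_elapid_potential.py | parse_band_name_args
-- ===== SOURCE A (Python) =====
-- from typing import Dict, List, Optional, Tuple
--
-- def parse_band_name_args(values: Optional[List[List[str]]]) -> List[str]:
--     """Flatten repeated/nested CLI band-name args, supporting comma-separated values."""
--     if not values:
--         return []
--     names: List[str] = []
--     seen = set()
--     for group in values:
--         for item in group:
--             for name in item.split(","):
--                 band_name = name.strip()
--                 if band_name and band_name not in seen:
--                     names.append(band_name)
--                     seen.add(band_name)
--     return names
-- ===== SOURCE B (Python) =====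
-- from typing import List, Optional
--
-- def parse_band_name_args(values: Optional[List[List[str]]]) -> List[str]:
--     """Flatten repeated/nested CLI band-name args, supporting comma-separated values."""
--     if not values:
--         return []
--     remaining = [n.strip() for g in values for i in g for n in i.split(",")]
--     out: List[str] = []
--     while remaining:
--         head, remaining = remaining[0], remaining[1:]
--         if head:
--             out.append(head)
--             remaining = [t for t in remaining if t != head]
--     return out
-- ===== Notes on version B (the rewrite author's own statement) =====
-- stated objective: alternative
-- what changed: B keeps no seen-set: it flattens/strips all tokens into a worklist, then repeatedly takes the head, emits it if nonempty, and deletes every later copy of it from the worklist, instead of A's single interleaved loop guarding each append with a membership set.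
import Mathlib
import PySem

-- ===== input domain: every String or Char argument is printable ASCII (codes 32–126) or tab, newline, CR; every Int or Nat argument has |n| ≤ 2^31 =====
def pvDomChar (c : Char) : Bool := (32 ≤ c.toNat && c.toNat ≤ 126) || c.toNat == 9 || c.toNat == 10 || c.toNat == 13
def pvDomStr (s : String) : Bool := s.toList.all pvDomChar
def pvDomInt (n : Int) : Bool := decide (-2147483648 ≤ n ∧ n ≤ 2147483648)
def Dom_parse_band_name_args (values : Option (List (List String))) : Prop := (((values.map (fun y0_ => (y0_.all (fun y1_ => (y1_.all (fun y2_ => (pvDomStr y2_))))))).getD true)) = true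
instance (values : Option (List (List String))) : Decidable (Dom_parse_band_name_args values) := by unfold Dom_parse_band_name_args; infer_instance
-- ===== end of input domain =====

-- B keeps no seen-set: it flattens and strips all tokens, then dedupes by a recursion that
-- emits the head and deletes every later copy of it (dropping empty heads): alternative, same result.

-- ===== PORT A =====
-- item.split(",") with the nonempty separator "," is PySem.Str.split? …, which is `some` here; .getD [] unwraps it (exact).
def parse_band_name_args (values : Option (List (List String))) : List String :=
  match values with
  | none => []
  | some vs =>
    if vs = [] then []          -- `if not values` is also true for the empty list
    else
      (vs.foldl (fun (st : List String × PySem.Set String) group =>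
        group.foldl (fun st item =>
          ((PySem.Str.split? item ",").getD []).foldl (fun (st : List String × PySem.Set String) name =>
            let band_name := PySem.Str.strip name
            if band_name ≠ "" ∧ st.2.contains band_name = false
            then (st.1 ++ [band_name], st.2.add band_name)
            else st) st) st) ([], PySem.Set.empty)).1

-- ===== PORT B =====
-- B's worklist loop: take the head, emit it if nonempty, delete every later copy of it.
def pvLoop (remaining : List String) (out : List String) : List String :=
  match remaining with
  | [] => out
  | head :: rest =>
    if head = "" then pvLoop rest out
    else pvLoop (rest.filter (fun t => t ≠ head)) (out ++ [head])
termination_by remaining.length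
decreasing_by
  · simp
  · simp only [List.length_unattach]
    exact Nat.lt_succ_of_le (le_trans (List.length_filter_le _ _) (by simp))

def parse_band_name_args_alt (values : Option (List (List String))) : List String :=
  match values with
  | none => []
  | some vs =>
    if vs = [] then []
    else
      pvLoop (vs.flatMap (fun g =>
        g.flatMap (fun i => ((PySem.Str.split? i ",").getD []).map PySem.Str.strip))) []

-- ===== PRECONDITION & SPEC =====
def Spec_parse_band_name_args (values : Option (List (List String))) (out : List String) : Prop := out = parse_band_name_args_alt values
instance (values : Option (List (List String))) (out : List String) : Decidable (Spec_parse_band_name_args values out) := by unfold Spec_parse_band_name_args; infer_instance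

-- ===== CLAIM (what is proved, stated in full; the proofs are below) =====
def Claim_equal_parse_band_name_args : Prop := ∀ (values : Option (List (List String))), Dom_parse_band_name_args values → Spec_parse_band_name_args values (parse_band_name_args values)

-- ===== LEMMAS AND PROOFS =====

-- A's token loop on a diagonal state (ns, ns) keeps the state diagonal and updates ns with
-- the nonempty tokens in order.
theorem pv_token_loop (toks : List String) (ns : PySem.Set String) :
    toks.foldl (fun (st : List String × PySem.Set String) b =>
        if b ≠ "" ∧ st.2.contains b = false
        then (st.1 ++ [b], st.2.add b)
        else st) (ns, ns)
      = (PySem.Set.update ns (toks.filter (fun b => b ≠ "")),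
         PySem.Set.update ns (toks.filter (fun b => b ≠ ""))) := by
  induction toks generalizing ns with
  | nil => simp [PySem.Set.update]
  | cons t ts ih =>
    rw [List.foldl_cons, List.filter_cons]
    by_cases h0 : t = ""
    · rw [if_neg (by simp [h0]), if_neg (by simp [h0])]
      exact ih ns
    · by_cases hm : t ∈ ns
      · have hc : PySem.Set.contains ns t = true := by
          rw [PySem.Set.contains_iff]; exact hm
        rw [if_neg (fun h => Bool.noConfusion (hc.symm.trans h.2)),
          if_pos (by simp [h0]), PySem.Set.update_cons,
          PySem.Set.add_of_mem hm]
        exact ih ns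
      · have hc : PySem.Set.contains ns t = false := by
          rw [Bool.eq_false_iff, Ne, PySem.Set.contains_iff]; exact hm
        rw [if_pos ⟨h0, hc⟩, if_pos (by simp [h0]), PySem.Set.update_cons,
          show (ns : List String) ++ [t] = PySem.Set.add ns t from
            (PySem.Set.add_of_not_mem hm).symm]
        exact ih (PySem.Set.add ns t)

-- A's nested loops equal the same step folded over the flattened, stripped token list.
theorem pv_group_flatten (vs : List (List String)) (st : List String × PySem.Set String) :
    vs.foldl (fun (st : List String × PySem.Set String) group =>
        group.foldl (fun st item =>
          ((PySem.Str.split? item ",").getD []).foldl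
            (fun (st : List String × PySem.Set String) name =>
              let band_name := PySem.Str.strip name
              if band_name ≠ "" ∧ st.2.contains band_name = false
              then (st.1 ++ [band_name], st.2.add band_name)
              else st) st) st) st
      = (vs.flatMap (fun group => group.flatMap
            (fun item => ((PySem.Str.split? item ",").getD []).map PySem.Str.strip))).foldl
          (fun (st : List String × PySem.Set String) b =>
            if b ≠ "" ∧ st.2.contains b = false
            then (st.1 ++ [b], st.2.add b)
            else st) st := by
  simp only [List.foldl_flatMap, List.foldl_map]

-- Adding elements already-seen-filtered: if x ∈ s, folding Set.add over xs is unchanged by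
-- first removing the copies of x.
theorem pv_foldl_add_filter (xs : List String) (s : PySem.Set String) (x : String)
    (hx : x ∈ s) :
    xs.foldl PySem.Set.add s = (xs.filter (fun y => y ≠ x)).foldl PySem.Set.add s := by
  induction xs generalizing s with
  | nil => rfl
  | cons y ys ih =>
    rw [List.filter_cons]
    by_cases hyx : y = x
    · rw [if_neg (by simp [hyx]), List.foldl_cons, hyx, PySem.Set.add_of_mem hx]
      exact ih s hx
    · rw [if_pos (by simp [hyx]), List.foldl_cons, List.foldl_cons]
      refine ih _ ?_
      unfold PySem.Set.add
      split
      · exact hx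
      · exact List.mem_append_left _ hx

-- Folding Set.add commutes with a head the list never mentions.
theorem pv_foldl_add_cons (l : List String) (s : PySem.Set String) (x : String)
    (hx : ∀ y ∈ l, y ≠ x) :
    l.foldl PySem.Set.add (x :: s) = x :: l.foldl PySem.Set.add s := by
  induction l generalizing s with
  | nil => rfl
  | cons y ys ih =>
    have hyx : y ≠ x := hx y (by simp)
    have hstep : PySem.Set.add (x :: s) y = x :: PySem.Set.add s y := by
      unfold PySem.Set.add
      have : PySem.Set.contains (x :: s) y = PySem.Set.contains s y := by
        simp [PySem.Set.contains, hyx]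
      rw [this]
      split <;> simp
    rw [List.foldl_cons, List.foldl_cons, hstep]
    exact ih _ (fun z hz => hx z (by simp [hz]))

-- First-occurrence dedup unfolds on a cons to "head, then dedup of the tail with later
-- copies of the head removed".
theorem pv_dedup_cons (x : String) (xs : List String) :
    PySem.List.dedup (x :: xs) = x :: PySem.List.dedup (xs.filter (fun y => y ≠ x)) := by
  have h1 : PySem.List.dedup (x :: xs)
      = xs.foldl PySem.Set.add (PySem.Set.add [] x) := by
    simp [PySem.List.dedup_eq_ofList, PySem.Set.ofList_eq_foldl]
  have h2 : PySem.List.dedup (xs.filter (fun y => y ≠ x))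
      = (xs.filter (fun y => y ≠ x)).foldl PySem.Set.add [] := by
    simp [PySem.List.dedup_eq_ofList, PySem.Set.ofList_eq_foldl]
  rw [h1, show (PySem.Set.add [] x : PySem.Set String) = [x] from rfl,
    pv_foldl_add_filter xs [x] x (by simp),
    show ([x] : PySem.Set String) = x :: ([] : PySem.Set String) from rfl,
    pv_foldl_add_cons _ _ _ (fun y hy => by simpa using (List.of_mem_filter hy)), h2]

-- B's worklist loop equals the accumulator followed by first-occurrence dedup of the
-- nonempty tokens.
theorem pv_loop_eq_dedup (toks out : List String) :
    pvLoop toks out = out ++ PySem.List.dedup (toks.filter (fun b => b ≠ "")) := by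
  induction hn : toks.length using Nat.strong_induction_on generalizing toks out with
  | _ n ih =>
    cases toks with
    | nil => simp [pvLoop]
    | cons h t =>
      by_cases hh : h = ""
      · rw [show pvLoop (h :: t) out = pvLoop t out by rw [pvLoop]; exact if_pos hh,
          List.filter_cons, if_neg (by simp [hh])]
        exact ih t.length (by simp [← hn]) t out rfl
      · rw [show pvLoop (h :: t) out = pvLoop (t.filter (fun x => x ≠ h)) (out ++ [h]) by
            rw [pvLoop]; exact if_neg hh,
          List.filter_cons, if_pos (by simp [hh]), pv_dedup_cons]
        have hlen : (t.filter (fun x => x ≠ h)).length < n := by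
          subst hn
          exact Nat.lt_succ_of_le (List.length_filter_le _ _)
        have hcomm : (t.filter (fun x => x ≠ h)).filter (fun b => b ≠ "")
            = (t.filter (fun b => b ≠ "")).filter (fun y => y ≠ h) := by
          rw [List.filter_filter, List.filter_filter]
          exact List.filter_congr (fun a _ => by simp [Bool.and_comm])
        rw [ih _ hlen _ _ rfl, hcomm, List.append_assoc]
        rfl

-- ===== VERDICT (by name: the statement is the Claim_ definition above) =====
theorem parse_band_name_args_spec : Claim_equal_parse_band_name_args := by
  intro values _
  unfold Spec_parse_band_name_args
  cases values with
  | none => rfl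
  | some vs =>
    simp only [parse_band_name_args, parse_band_name_args_alt]
    by_cases hvs : vs = []
    · simp [hvs]
    · rw [if_neg hvs, if_neg hvs, pv_group_flatten,
        show (PySem.Set.empty : PySem.Set String) = ([] : List String) from rfl,
        pv_token_loop, pv_loop_eq_dedup]
      simp [PySem.Set.update, PySem.List.dedup_eq_ofList, PySem.Set.ofList_eq_foldl]
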